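-- pv_equiv track=rewrite | github.com/fabichoi/1d1p | src_50th_week.py | solve
-- ===== SOURCE A (Python) =====
-- def solve(n, m, ar):
--     cntX, cntY = 0, 0
--     for i in range(n):
--         flagY = True
--         for j in range(m):
--             if ar[i][j] == 'X':
--                 flagY = False
--         if flagY:
--             cntY += 1
--
--     for i in range(m):
--         flagX = True
--         for j in range(n):
--             if ar[j][i] == 'X':
--                 flagX = False
--         if flagX:
--             cntX += 1
--
--     return max(cntY, cntX)
-- ===== SOURCE B (Python) =====
-- def solve(n, m, ar):
--     row_has_x = [False] * n
--     col_has_x = [False] * m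
--     for i in range(n):
--         for j in range(m):
--             if ar[i][j] == 'X':
--                 row_has_x[i] = True
--                 col_has_x[j] = True
--     return max(row_has_x.count(False), col_has_x.count(False))
-- ===== Notes on version B (the rewrite author's own statement) =====
-- stated objective: alternative
-- what changed: Replaces A's two separate nested scans (rows, then columns re-reading ar[j][i]) by a single combined pass that marks row/column X-flags in two boolean tables and counts the unmarked entries.
import Mathlib
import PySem

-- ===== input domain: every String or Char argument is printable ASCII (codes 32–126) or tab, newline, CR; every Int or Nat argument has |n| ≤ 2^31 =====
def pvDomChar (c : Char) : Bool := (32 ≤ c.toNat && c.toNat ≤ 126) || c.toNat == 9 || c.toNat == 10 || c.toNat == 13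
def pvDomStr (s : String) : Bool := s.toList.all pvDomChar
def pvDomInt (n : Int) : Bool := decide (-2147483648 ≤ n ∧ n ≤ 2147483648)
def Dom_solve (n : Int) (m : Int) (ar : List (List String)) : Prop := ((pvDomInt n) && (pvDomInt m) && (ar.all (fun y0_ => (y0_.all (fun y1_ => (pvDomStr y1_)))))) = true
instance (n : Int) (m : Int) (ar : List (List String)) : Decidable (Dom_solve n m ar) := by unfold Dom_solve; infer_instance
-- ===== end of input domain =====

-- B makes one combined pass marking row/column X-flags instead of A's two separate nested scans; return-value equivalence only.

-- ===== PORT A =====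
def solve (n : Int) (m : Int) (ar : List (List String)) : Int :=
  let cntY : Int := (PySem.List.pyRange 0 n 1).foldl (fun cntY i =>
      let flagY := (PySem.List.pyRange 0 m 1).foldl (fun flagY j =>
          if PySem.List.pyGetD (PySem.List.pyGetD ar i []) j "" == "X" then false else flagY) true
      if flagY then cntY + 1 else cntY) 0
  let cntX : Int := (PySem.List.pyRange 0 m 1).foldl (fun cntX i =>
      let flagX := (PySem.List.pyRange 0 n 1).foldl (fun flagX j =>
          if PySem.List.pyGetD (PySem.List.pyGetD ar j []) i "" == "X" then false else flagX) true
      if flagX then cntX + 1 else cntX) 0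
  max cntY cntX

-- ===== PORT B =====
def solve_alt (n : Int) (m : Int) (ar : List (List String)) : Int :=
  let rc := (PySem.List.pyRange 0 n 1).foldl (fun rc i =>
      (PySem.List.pyRange 0 m 1).foldl (fun rc j =>
          if PySem.List.pyGetD (PySem.List.pyGetD ar i []) j "" == "X" then
            (PySem.List.pySetD rc.1 i true, PySem.List.pySetD rc.2 j true)
          else rc) rc)
    (List.replicate n.toNat false, List.replicate m.toNat false)
  max ((rc.1.count false : Int)) ((rc.2.count false : Int))

-- ===== PRECONDITION & SPEC =====
-- Pre_ excludes exactly the inputs on which Python A raises an IndexError: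
-- when both n and m are positive, ar must have at least n rows and each of the first n rows at least m cells.
def Pre_solve (n : Int) (m : Int) (ar : List (List String)) : Prop :=
  0 < n → 0 < m → (n ≤ (ar.length : Int) ∧ ∀ row ∈ ar.take n.toNat, m ≤ (row.length : Int))
instance (n : Int) (m : Int) (ar : List (List String)) : Decidable (Pre_solve n m ar) := by unfold Pre_solve; infer_instance
def pvWitness_solve : Int × Int × List (List String) := (2, 2, [["X", "."], [".", "."]])
def Spec_solve (n : Int) (m : Int) (ar : List (List String)) (out : Int) : Prop := out = solve_alt n m ar
instance (n : Int) (m : Int) (ar : List (List String)) (out : Int) : Decidable (Spec_solve n m ar out) := by unfold Spec_solve; infer_instance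

-- ===== CLAIM (what is proved, stated in full; the proofs are below) =====
def Claim_equal_solve : Prop := ∀ (n : Int) (m : Int) (ar : List (List String)), Dom_solve n m ar → Pre_solve n m ar → Spec_solve n m ar (solve n m ar)

-- ===== LEMMAS AND PROOFS =====

-- the cell read both ports perform
def pvCell (ar : List (List String)) (i j : Int) : Bool :=
  PySem.List.pyGetD (PySem.List.pyGetD ar i []) j "" == "X"

def pvRowAny (m : Int) (ar : List (List String)) (i : Int) : Bool :=
  (PySem.List.pyRange 0 m 1).any (fun j => pvCell ar i j)

def pvColAny (n : Int) (ar : List (List String)) (j : Int) : Bool :=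
  (PySem.List.pyRange 0 n 1).any (fun i => pvCell ar i j)

-- A's inner flag loop is a negated 'any'
theorem pv_flag_fold (l : List Int) (p : Int → Bool) (b : Bool) :
    l.foldl (fun f j => if p j then false else f) b = (b && !(l.any p)) := by
  induction l generalizing b with
  | nil => simp
  | cons j l ih =>
    simp only [List.foldl_cons, List.any_cons, ih]
    cases hp : p j <;> simp

-- A's outer counting loop is a countP
theorem pv_count_fold (l : List Int) (q : Int → Bool) (a : Int) :
    l.foldl (fun c i => if q i then c + 1 else c) a = a + (l.countP q : Int) := by
  induction l generalizing a with
  | nil => simp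
  | cons i l ih =>
    simp only [List.foldl_cons, List.countP_cons, ih]
    cases hq : q i <;> simp <;> omega

-- a fold that conditionally sets a FIXED nonnegative index collapses to one conditional set
theorem pv_set_fixed_fold (l : List Int) (p : Int → Bool) (i : Int) (hi : 0 ≤ i) (r : List Bool) :
    l.foldl (fun r j => if p j then PySem.List.pySetD r i true else r) r
      = (if l.any p then PySem.List.pySetD r i true else r) := by
  induction l generalizing r with
  | nil => simp
  | cons j l ih =>
    simp only [List.foldl_cons, List.any_cons]
    by_cases hp : p j = true
    · rw [if_pos hp, ih]
      by_cases hl : l.any p = true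
      case neg =>
        have hl' : l.any p = false := by simpa using hl
        simp [hp, hl']
      case pos =>
        have hset : PySem.List.pySetD (PySem.List.pySetD r i true) i true
            = PySem.List.pySetD r i true := by
          simp only [PySem.List.pySetD_of_nonneg _ _ hi]
          exact List.set_set true
        simp [hp, hl, hset]
    · have hp' : p j = false := by simpa using hp
      rw [if_neg hp, ih]
      simp [hp']

-- a fold that conditionally sets the LOOP index, all indices nonneg and in range
theorem pv_set_var_fold (l : List Int) (q : Int → Bool) (r : List Bool) (t : Nat)
    (hl : ∀ i ∈ l, 0 ≤ i ∧ i.toNat < r.length) :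
    (l.foldl (fun r i => if q i then PySem.List.pySetD r i true else r) r)[t]?
      = Option.map (fun b => b || l.any (fun i => q i && decide (i = (t : Int)))) r[t]? := by
  induction l generalizing r with
  | nil => cases h : r[t]? <;> simp [h]
  | cons i l ih =>
    obtain ⟨hi0, hilen⟩ := hl i (by simp)
    simp only [List.foldl_cons, List.any_cons]
    by_cases hq : q i = true
    · rw [if_pos hq, PySem.List.pySetD_of_nonneg _ _ hi0,
          ih _ (fun x hx => by simpa [List.length_set] using hl x (by simp [hx]))]
      by_cases hit : i.toNat = t
      · have hd : decide (i = ((t : Nat) : Int)) = true := decide_eq_true (by omega)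
        rw [hit, List.getElem?_set_self (hit ▸ hilen), List.getElem?_eq_getElem (hit ▸ hilen)]
        simp [hq, hd]
      · have hd : decide (i = ((t : Nat) : Int)) = false := decide_eq_false (by omega)
        rw [List.getElem?_set_ne hit]
        cases h : r[t]? <;> simp [h, hq, hd]
    · rw [if_neg hq, ih _ (fun x hx => hl x (by simp [hx]))]
      cases h : r[t]? <;> simp [h, (by simpa using hq : q i = false)]

-- length is preserved by the set-folds
theorem pv_len_fold (L : List Int) (step : List Bool → Int → List Bool)
    (hstep : ∀ w i, (step w i).length = w.length) (w : List Bool) :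
    (L.foldl step w).length = w.length := by
  induction L generalizing w with
  | nil => rfl
  | cons i L ih => simp [List.foldl_cons, ih, hstep]

-- generic: a fold whose step acts pointwise-or on index t accumulates an 'any'
theorem pv_map_fold (L : List Int) (step : List Bool → Int → List Bool) (h : Int → Nat → Bool)
    (len : Nat)
    (hlen : ∀ i ∈ L, ∀ w : List Bool, w.length = len → (step w i).length = len)
    (hstep : ∀ i ∈ L, ∀ (w : List Bool) (t : Nat), w.length = len →
        (step w i)[t]? = Option.map (fun b => b || h i t) w[t]?)
    (w : List Bool) (hw : w.length = len) (t : Nat) :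
    (L.foldl step w)[t]? = Option.map (fun b => b || L.any (fun i => h i t)) w[t]? := by
  induction L generalizing w with
  | nil => cases hww : w[t]? <;> simp [hww]
  | cons i L ih =>
    simp only [List.foldl_cons, List.any_cons]
    rw [ih (fun x hx => hlen x (by simp [hx])) (fun x hx => hstep x (by simp [hx])) _
        (hlen i (by simp) w hw), hstep i (by simp) w t hw]
    cases hww : w[t]? <;> simp [hww, Bool.or_assoc]

-- 'any (q i && i = t)' over a list containing t is just q t
theorem pv_any_single (L : List Int) (q : Int → Bool) (t : Int) (ht : t ∈ L) :
    L.any (fun i => q i && decide (i = t)) = q t := by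
  cases hq : q t
  · simp only [List.any_eq_false]
    intro i hi
    by_cases hit : i = t
    · subst hit; simp [hq]
    · simp [hit]
  · simp only [List.any_eq_true]
    exact ⟨t, ht, by simp [hq]⟩

theorem solve_eq_counts (n m : Int) (ar : List (List String)) :
    solve n m ar = max (((PySem.List.pyRange 0 n 1).countP (fun i => !(pvRowAny m ar i)) : Int))
                       (((PySem.List.pyRange 0 m 1).countP (fun j => !(pvColAny n ar j)) : Int)) := by
  unfold solve
  simp only [pv_flag_fold, Bool.true_and, pv_count_fold]
  unfold pvRowAny pvColAny pvCell
  simp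

-- B's pair fold splits into the row fold and the column fold
theorem pv_pair_inner (Lm : List Int) (p : Int → Bool) (i : Int) (r c : List Bool) :
    Lm.foldl (fun (rc : List Bool × List Bool) j =>
        if p j then (PySem.List.pySetD rc.1 i true, PySem.List.pySetD rc.2 j true) else rc) (r, c)
      = (Lm.foldl (fun r j => if p j then PySem.List.pySetD r i true else r) r,
         Lm.foldl (fun c j => if p j then PySem.List.pySetD c j true else c) c) := by
  induction Lm generalizing r c with
  | nil => rfl
  | cons j l ih =>
    simp only [List.foldl_cons]
    cases hp : p j <;> simp [ih]

theorem pv_pair_fold (Ln Lm : List Int) (P : Int → Int → Bool) (r0 c0 : List Bool) :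
    Ln.foldl (fun rc i => Lm.foldl (fun (rc : List Bool × List Bool) j =>
        if P i j then (PySem.List.pySetD rc.1 i true, PySem.List.pySetD rc.2 j true) else rc) rc)
      (r0, c0)
      = (Ln.foldl (fun r i => Lm.foldl (fun r j => if P i j then PySem.List.pySetD r i true else r) r) r0,
         Ln.foldl (fun c i => Lm.foldl (fun c j => if P i j then PySem.List.pySetD c j true else c) c) c0) := by
  induction Ln generalizing r0 c0 with
  | nil => rfl
  | cons i L ih =>
    simp only [List.foldl_cons, pv_pair_inner, ih]

-- the row table B builds holds exactly the row-has-X flags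
theorem pv_row_table (n m : Int) (ar : List (List String)) :
    (PySem.List.pyRange 0 n 1).foldl
        (fun r i => (PySem.List.pyRange 0 m 1).foldl
          (fun r j => if pvCell ar i j then PySem.List.pySetD r i true else r) r)
        (List.replicate n.toNat false)
      = (List.range n.toNat).map (fun t : Nat => pvRowAny m ar (t : Int)) := by
  rw [PySem.List.foldl_congr_mem _ _
      (fun r i => if pvRowAny m ar i then PySem.List.pySetD r i true else r) _
      (fun r i hmem => pv_set_fixed_fold _ _ _ (PySem.List.mem_pyRange_one.mp hmem).1 r)]
  apply List.ext_getElem?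
  intro t
  rw [pv_map_fold (PySem.List.pyRange 0 n 1)
      (fun r i => if pvRowAny m ar i then PySem.List.pySetD r i true else r)
      (fun i t => pvRowAny m ar i && decide (i = (t : Int))) n.toNat
      (fun i _ w hw => by
        by_cases h : pvRowAny m ar i = true
        · simp [h, PySem.List.length_pySetD, hw]
        · simp [h, hw])
      (fun i hmem w t hw => by
        have h := pv_set_var_fold [i] (pvRowAny m ar) w t
          (fun x hx => by
            have hx' : x = i := by simpa using hx
            subst hx'
            obtain ⟨h1, h2⟩ := PySem.List.mem_pyRange_one.mp hmem
            exact ⟨h1, by omega⟩)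
        simpa using h)
      _ (by simp) t]
  by_cases ht : t < n.toNat
  · have htmem : ((t : Nat) : Int) ∈ PySem.List.pyRange 0 n 1 :=
      PySem.List.mem_pyRange_one.mpr ⟨by omega, by omega⟩
    have hs := pv_any_single (PySem.List.pyRange 0 n 1) (pvRowAny m ar) _ htmem
    simp [List.getElem?_replicate, ht, List.getElem?_range, hs]
  · rw [List.getElem?_eq_none (by simpa using not_lt.mp ht),
        List.getElem?_eq_none (by simpa using not_lt.mp ht)]
    rfl

-- the column table B builds holds exactly the column-has-X flags
theorem pv_col_table (n m : Int) (ar : List (List String)) :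
    (PySem.List.pyRange 0 n 1).foldl
        (fun c i => (PySem.List.pyRange 0 m 1).foldl
          (fun c j => if pvCell ar i j then PySem.List.pySetD c j true else c) c)
        (List.replicate m.toNat false)
      = (List.range m.toNat).map (fun t : Nat => pvColAny n ar (t : Int)) := by
  apply List.ext_getElem?
  intro t
  rw [pv_map_fold (PySem.List.pyRange 0 n 1)
      (fun c i => (PySem.List.pyRange 0 m 1).foldl
        (fun c j => if pvCell ar i j then PySem.List.pySetD c j true else c) c)
      (fun i t => (PySem.List.pyRange 0 m 1).any (fun j => pvCell ar i j && decide (j = (t : Int))))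
      m.toNat
      (fun i _ w hw => by
        rw [pv_len_fold _ _
          (fun w j => by
            by_cases h : pvCell ar i j = true
            · simp [h, PySem.List.length_pySetD]
            · simp [h]) w]
        exact hw)
      (fun i _ w t hw =>
        pv_set_var_fold (PySem.List.pyRange 0 m 1) (pvCell ar i) w t
          (fun j hj => by
            obtain ⟨h1, h2⟩ := PySem.List.mem_pyRange_one.mp hj
            exact ⟨h1, by omega⟩))
      _ (by simp) t]
  by_cases ht : t < m.toNat
  · have htmem : ((t : Nat) : Int) ∈ PySem.List.pyRange 0 m 1 :=
      PySem.List.mem_pyRange_one.mpr ⟨by omega, by omega⟩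
    have hs : ∀ q : Int → Bool,
        (PySem.List.pyRange 0 m 1).any (fun j => q j && decide (j = ((t : Nat) : Int))) = q (t : Nat) :=
      fun q => pv_any_single _ q _ htmem
    simp [List.getElem?_replicate, ht, List.getElem?_range, hs, pvColAny]
  · rw [List.getElem?_eq_none (by simpa using not_lt.mp ht),
        List.getElem?_eq_none (by simpa using not_lt.mp ht)]
    rfl

theorem solve_alt_eq_counts (n m : Int) (ar : List (List String)) :
    solve_alt n m ar =
      max ((((List.range n.toNat).map (fun t : Nat => pvRowAny m ar (t : Int))).count false : Int))
          ((((List.range m.toNat).map (fun t : Nat => pvColAny n ar (t : Int))).count false : Int)) := by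
  unfold solve_alt
  rw [show (fun (rc : List Bool × List Bool) (i : Int) => (PySem.List.pyRange 0 m 1).foldl
        (fun (rc : List Bool × List Bool) j =>
          if PySem.List.pyGetD (PySem.List.pyGetD ar i []) j "" == "X" then
            (PySem.List.pySetD rc.1 i true, PySem.List.pySetD rc.2 j true)
          else rc) rc)
      = (fun rc i => (PySem.List.pyRange 0 m 1).foldl (fun (rc : List Bool × List Bool) j =>
          if pvCell ar i j then (PySem.List.pySetD rc.1 i true, PySem.List.pySetD rc.2 j true)
          else rc) rc) from rfl]
  rw [pv_pair_fold, pv_row_table, pv_col_table]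

-- counting the False entries of a table equals A's countP over the same range
theorem pv_count_table (k : Nat) (g : Int → Bool) :
    (((List.range k).map (fun t : Nat => g (t : Int))).count false : Int)
      = (((List.range k).map (fun t : Nat => (t : Int))).countP (fun i => !(g i)) : Int) := by
  congr 1
  rw [List.count_eq_countP]
  simp only [List.countP_map]
  apply List.countP_congr
  intro t _
  cases hg : g (t : Int) <;> simp [Function.comp, hg]

-- ===== VERDICT (by name: the statement is the Claim_ definition above) =====
theorem solve_spec : Claim_equal_solve := by
  intro n m ar _ _
  unfold Spec_solve
  rw [solve_eq_counts, solve_alt_eq_counts, pv_count_table, pv_count_table,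
      show PySem.List.pyRange 0 n 1 = (List.range n.toNat).map (fun t : Nat => (t : Int)) by
        rw [PySem.List.pyRange_one]; simp,
      show PySem.List.pyRange 0 m 1 = (List.range m.toNat).map (fun t : Nat => (t : Int)) by
        rw [PySem.List.pyRange_one]; simp]

-- ===== VERDICT is the theorem above: solve_spec : Claim_equal_solve =====
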